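-- pv_equiv track=rewrite | github.com/andresroliveira/Unicamp | MC102/lab10.py | consulta
-- ===== SOURCE A (Python) =====
-- def transpose(m):
-- 	n = len(m)
-- 	tran = [[0 for i in range(n)] for j in range(n)]
--
-- 	for i in range(n):
-- 		for j in range(n):
-- 			tran[i][j] = m[j][i]
--
-- 	return tran
--
-- def verificaLinha(grid):
-- 	for l in grid:
-- 		c = 0
-- 		for e in l:
-- 			if e == -1:
-- 				c += 1
--
-- 		if c == len(l):
-- 			return True
--
-- 	return False
--
-- def verificaColuna(grid):
-- 	grid = transpose(grid)
--
-- 	return verificaLinha(grid)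
--
-- def verificaDiagonal(grid):
-- 	f = 0
-- 	s = 0
-- 	n = len(grid)
--
-- 	for i in range(n):
-- 		if grid[i][i] == -1:
-- 			f += 1
-- 		if grid[i][n - i - 1] == -1:
-- 			s += 1
--
-- 	return f == n or s == n
--
-- def bingo(grid):
-- 	if verificaLinha(grid):
-- 		return True
-- 	if verificaColuna(grid):
-- 		return True
-- 	if verificaDiagonal(grid):
-- 		return True
--
-- 	return False
--
-- def consulta(grid, tipo, num):
--     if num in grid[tipo]:
--         for i in range(len(grid[tipo])):
--             if num == grid[tipo][i]:
--                 grid[tipo][i] = -1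
--                 break
--
--         if bingo(grid):
--             return (grid, 2)
--         return (grid, 1)
--     return (grid, 0)
-- ===== SOURCE B (Python) =====
-- def consulta(grid, tipo, num):
--     row = grid[tipo]
--     try:
--         row[row.index(num)] = -1
--     except ValueError:
--         return (grid, 0)
--     n = len(grid)
--     # one fused pass: boolean accumulators instead of staged scans/transpose
--     rowwin = False
--     col = [True] * n
--     d1 = True
--     d2 = True
--     for i, r in enumerate(grid):
--         rowwin = rowwin or all(c == -1 for c in r)
--         col = [c and r[j] == -1 for j, c in enumerate(col)]
--         d1 = d1 and r[i] == -1
--         d2 = d2 and r[n - 1 - i] == -1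
--     win = rowwin or any(col) or d1 or d2
--     return (grid, 2 if win else 1)
-- ===== Notes on version B (the rewrite author's own statement) =====
-- stated objective: alternative
-- what changed: B replaces A's staged helpers (row scan, transpose + rescan, diagonal counters, repeated from scratch) with ONE fused pass over the grid that maintains boolean accumulators (row-win flag, a per-column all--1 flag list, two diagonal flags), and finds the cell via row.index(num) under try/except instead of a membership test plus a search loop.
-- outside the precondition, e.g. on consulta([[1], [-1, 2]], 1, 2): A returns ([[1], [-1, -1]], 2), B raises IndexError
import Mathlib
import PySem

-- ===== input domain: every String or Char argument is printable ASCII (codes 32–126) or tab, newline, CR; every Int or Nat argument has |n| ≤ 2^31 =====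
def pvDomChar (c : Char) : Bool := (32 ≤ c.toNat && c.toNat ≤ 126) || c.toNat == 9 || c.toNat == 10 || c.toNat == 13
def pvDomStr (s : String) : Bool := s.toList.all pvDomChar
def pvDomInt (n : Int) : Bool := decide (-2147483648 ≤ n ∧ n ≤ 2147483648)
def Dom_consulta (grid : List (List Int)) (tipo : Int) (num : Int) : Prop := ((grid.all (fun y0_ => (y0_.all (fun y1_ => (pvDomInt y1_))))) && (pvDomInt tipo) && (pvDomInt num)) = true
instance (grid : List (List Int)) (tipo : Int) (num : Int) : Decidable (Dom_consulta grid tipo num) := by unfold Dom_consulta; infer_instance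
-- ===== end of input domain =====

-- B fuses A's staged win checks (row scan, transpose + rescan, diagonal counters) into ONE
-- pass over the grid carrying boolean accumulators, and finds the cell via list.index;
-- equivalence is about the RETURN value (both Pythons mark the caller's grid in place).

-- ===== PORT A =====
def pvTranspose (m : List (List Int)) : List (List Int) :=
  let n := m.length
  (List.range n).map (fun (i : Nat) =>
    (List.range n).map (fun (j : Nat) =>
      PySem.List.pyGetD (PySem.List.pyGetD m (j : Int) []) (i : Int) 0))

def pvVerificaLinha (g : List (List Int)) : Bool :=
  g.any (fun l =>
    decide ((l.foldl (fun c e => if e = -1 then c + 1 else c) (0 : Int)) = (l.length : Int)))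

def pvVerificaColuna (g : List (List Int)) : Bool :=
  pvVerificaLinha (pvTranspose g)

def pvVerificaDiagonal (g : List (List Int)) : Bool :=
  let n := g.length
  let fs := (List.range n).foldl (fun (p : Int × Int) (i : Nat) =>
    ((if PySem.List.pyGetD (PySem.List.pyGetD g (i : Int) []) (i : Int) 0 = -1 then p.1 + 1 else p.1),
     (if PySem.List.pyGetD (PySem.List.pyGetD g (i : Int) []) ((n : Int) - (i : Int) - 1) 0 = -1 then p.2 + 1 else p.2)))
    ((0 : Int), (0 : Int))
  decide (fs.1 = (n : Int)) || decide (fs.2 = (n : Int))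

def pvBingo (g : List (List Int)) : Bool :=
  pvVerificaLinha g || pvVerificaColuna g || pvVerificaDiagonal g

-- the 'for i … if num == grid[tipo][i]: grid[tipo][i] = -1; break' loop
def pvMark (l : List Int) (num : Int) : List Int :=
  match l with
  | [] => []
  | x :: xs => if num = x then (-1) :: xs else x :: pvMark xs num

def consulta (grid : List (List Int)) (tipo : Int) (num : Int) : List (List Int) × Int :=
  let row := PySem.List.pyGetD grid tipo []
  if num ∈ row then
    let grid' := PySem.List.pySetD grid tipo (pvMark row num)
    if pvBingo grid' then (grid', 2) else (grid', 1)
  else (grid, 0)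

-- ===== PORT B =====
-- Source B's fused loop: state (rowwin, col flags, d1, d2); the short-circuiting Python reads
-- r[j], r[i], r[n-1-i] are ported with pyGetD (exact inside Pre_, where every index is in range).
def consulta_alt (grid : List (List Int)) (tipo : Int) (num : Int) : List (List Int) × Int :=
  let row := PySem.List.pyGetD grid tipo []
  match PySem.List.index? row num with
  | none => (grid, 0)      -- the except ValueError branch
  | some k =>
    let g := PySem.List.pySetD grid tipo (row.set k (-1))
    let n := g.length
    let st := (PySem.List.enumerate g).foldl
      (fun (s : Bool × List Bool × Bool × Bool) (p : Int × List Int) =>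
        (s.1 || p.2.all (fun c => decide (c = -1)),
         (PySem.List.enumerate s.2.1).map
           (fun q => q.2 && decide (PySem.List.pyGetD p.2 q.1 0 = -1)),
         s.2.2.1 && decide (PySem.List.pyGetD p.2 p.1 0 = -1),
         s.2.2.2 && decide (PySem.List.pyGetD p.2 ((n : Int) - 1 - p.1) 0 = -1)))
      (false, List.replicate n true, true, true)
    let win := st.1 || st.2.1.any id || st.2.2.1 || st.2.2.2
    (g, if win then 2 else 1)

-- ===== PRECONDITION & SPEC =====
-- Pre_ excludes tipo out of range (IndexError on grid[tipo]) and, when num is present in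
-- that row, grids having a row shorter than len(grid), on which the column/diagonal reads
-- of both programs raise IndexError (except when an early row win short-circuits them, so
-- a few such ragged grids still return — see the cite).
def Pre_consulta (grid : List (List Int)) (tipo : Int) (num : Int) : Prop :=
  PySem.Raise.InRange grid.length tipo ∧
    (num ∈ PySem.List.pyGetD grid tipo [] → ∀ r ∈ grid, grid.length ≤ r.length)
instance (grid : List (List Int)) (tipo : Int) (num : Int) : Decidable (Pre_consulta grid tipo num) := by
  unfold Pre_consulta; infer_instance

def pvWitness_consulta : List (List Int) × Int × Int := ([[1, 2], [3, -1]], 0, 2)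

def Spec_consulta (grid : List (List Int)) (tipo : Int) (num : Int) (out : List (List Int) × Int) : Prop := out = consulta_alt grid tipo num
instance (grid : List (List Int)) (tipo : Int) (num : Int) (out : List (List Int) × Int) : Decidable (Spec_consulta grid tipo num out) := by unfold Spec_consulta; infer_instance

-- ===== CLAIM (what is proved, stated in full; the proofs are below) =====
def Claim_equal_consulta : Prop := ∀ (grid : List (List Int)) (tipo : Int) (num : Int), Dom_consulta grid tipo num → Pre_consulta grid tipo num → Spec_consulta grid tipo num (consulta grid tipo num)

-- ===== LEMMAS AND PROOFS =====

-- A's counting loop reaches the row length iff every element satisfies the test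
theorem pv_count_eq_len {α : Type} (l : List α) (p : α → Prop) [DecidablePred p] :
    decide ((l.foldl (fun c e => if p e then c + 1 else c) (0 : Int)) = (l.length : Int)) =
      l.all (fun e => decide (p e)) := by
  rw [PySem.List.foldl_ite_add_one]
  rw [Bool.eq_iff_iff]
  simp only [zero_add, Int.natCast_inj, decide_eq_true_eq, List.all_eq_true, decide_eq_true_eq]
  constructor
  · intro h a ha
    simpa using List.countP_eq_length.mp h a ha
  · intro h
    exact List.countP_eq_length.mpr (fun a ha => by simpa using h a ha)

theorem pvVerificaLinha_eq (g : List (List Int)) :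
    pvVerificaLinha g = g.any (fun r => r.all (fun c => decide (c = -1))) := by
  unfold pvVerificaLinha
  exact PySem.List.any_congr_mem (fun x _ => pv_count_eq_len x (fun e => e = -1))

theorem pvVerificaColuna_eq (g : List (List Int)) :
    pvVerificaColuna g = (List.range g.length).any (fun c => (List.range g.length).all (fun r =>
      decide (PySem.List.pyGetD (PySem.List.pyGetD g (r : Int) []) (c : Int) 0 = -1))) := by
  unfold pvVerificaColuna pvTranspose
  rw [pvVerificaLinha_eq]
  simp only [List.any_map, Function.comp_def, List.all_map]

theorem pvVerificaDiagonal_eq (g : List (List Int)) :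
    pvVerificaDiagonal g =
      ((List.range g.length).all (fun i =>
          decide (PySem.List.pyGetD (PySem.List.pyGetD g (i : Int) []) (i : Int) 0 = -1))
       || (List.range g.length).all (fun i =>
          decide (PySem.List.pyGetD (PySem.List.pyGetD g (i : Int) []) ((g.length : Int) - (i : Int) - 1) 0 = -1))) := by
  have h1 := pv_count_eq_len (List.range g.length)
    (fun i : Nat => PySem.List.pyGetD (PySem.List.pyGetD g (i : Int) []) (i : Int) 0 = -1)
  have h2 := pv_count_eq_len (List.range g.length)
    (fun i : Nat => PySem.List.pyGetD (PySem.List.pyGetD g (i : Int) []) ((g.length : Int) - (i : Int) - 1) 0 = -1)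
  simp only [List.length_range] at h1 h2
  simp only [pvVerificaDiagonal]
  rw [PySem.List.foldl_prod_mk
    (f := fun (c : Int) (i : Nat) => if PySem.List.pyGetD (PySem.List.pyGetD g (i : Int) []) (i : Int) 0 = -1 then c + 1 else c)
    (g := fun (c : Int) (i : Nat) => if PySem.List.pyGetD (PySem.List.pyGetD g (i : Int) []) ((g.length : Int) - (i : Int) - 1) 0 = -1 then c + 1 else c)]
  simp only [h1, h2]

-- A marks the first occurrence; that is set at index?
theorem pvMark_eq_set (l : List Int) (num : Int) (h : num ∈ l) :
    pvMark l num = l.set ((PySem.List.index? l num).getD 0) (-1) := by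
  induction l with
  | nil => simp at h
  | cons x xs ih =>
    by_cases hx : num = x
    · subst hx
      rw [PySem.List.index?_cons_self]
      simp [pvMark]
    · have hmem : num ∈ xs := by
        rcases List.mem_cons.mp h with h1 | h1
        · exact absurd h1 hx
        · exact h1
      rw [PySem.List.index?_cons_of_ne _ (Ne.symm hx)]
      obtain ⟨k, hk⟩ := Option.isSome_iff_exists.mp
        ((PySem.List.index?_isSome_iff xs num).mpr hmem)
      rw [PySem.List.index?_eq_idxOf?] at hk
      simp [pvMark, hx, hk, ih hmem]

-- ---- B-side characterisation of the fused fold ----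

theorem pv_foldl_or {α : Type} (l : List α) (p : α → Bool) (b : Bool) :
    l.foldl (fun acc x => acc || p x) b = (b || l.any p) := by
  induction l generalizing b with
  | nil => simp
  | cons x xs ih => simp [ih, Bool.or_assoc]

theorem pv_foldl_and {α : Type} (l : List α) (p : α → Bool) (b : Bool) :
    l.foldl (fun acc x => acc && p x) b = (b && l.all p) := by
  induction l generalizing b with
  | nil => simp
  | cons x xs ih => simp [ih, Bool.and_assoc]

-- a fold over enumerate(g) that ignores the index is a fold over g
theorem pv_foldl_enum_snd {α β : Type} (g : List α) (f : β → α → β) (i : β) (s : Int) :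
    (PySem.List.enumerate g s).foldl (fun a p => f a p.2) i = g.foldl f i := by
  conv_rhs => rw [← PySem.List.map_snd_enumerate g s]
  rw [List.foldl_map]

theorem pv_enum_map_range {α : Type} (n : Nat) (f : Nat → α) :
    PySem.List.enumerate ((List.range n).map f) 0 =
      (List.range n).map (fun (j : Nat) => ((j : Int), f j)) := by
  apply List.ext_getElem
  · simp [PySem.List.length_enumerate]
  · intro i h1 h2
    rw [PySem.List.getElem_enumerate]
    simp

-- the column-flag component: pointwise AND over the processed rows
theorem pv_col_fold (n : Nat) (rs : List (List Int)) (f : Nat → Bool) :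
    rs.foldl (fun (col : List Bool) (r : List Int) =>
        (PySem.List.enumerate col).map
          (fun q => q.2 && decide (PySem.List.pyGetD r q.1 0 = -1)))
      ((List.range n).map f)
    = (List.range n).map (fun j =>
        f j && rs.all (fun r => decide (PySem.List.pyGetD r (j : Int) 0 = -1))) := by
  induction rs generalizing f with
  | nil => simp
  | cons r rs ih =>
    simp only [List.foldl_cons]
    rw [pv_enum_map_range]
    simp only [List.map_map, Function.comp_def]
    rw [ih (fun j => f j && decide (PySem.List.pyGetD r (j : Int) 0 = -1))]
    apply List.map_congr_left
    intro j _
    simp [Bool.and_assoc]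

-- all over the rows = all over the row indices (pyGetD at an in-range Nat index)
theorem pv_all_rows (g : List (List Int)) (P : List Int → Bool) :
    g.all P = (List.range g.length).all (fun i => P (PySem.List.pyGetD g (i : Int) [])) := by
  conv_lhs => rw [← PySem.List.map_pyGetD_pyRange_zero g []]
  rw [List.all_map,
    show PySem.List.len g = ((g.length : Nat) : Int) from rfl,
    PySem.List.pyRange_zero_natCast, List.all_map]
  simp only [Function.comp_def]

-- all over enumerate(g) = all over the row indices (for the two diagonals)
theorem pv_enum_all (g : List (List Int)) (f : Int × List Int → Bool) :
    (PySem.List.enumerate g).all f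
      = (List.range g.length).all (fun i => f ((i : Int), PySem.List.pyGetD g (i : Int) [])) := by
  rw [PySem.List.enumerate_eq_map_pyRange g [], List.all_map,
    show PySem.List.len g = ((g.length : Nat) : Int) from rfl,
    PySem.List.pyRange_zero_natCast, List.all_map]
  simp only [Function.comp_def]

-- the fused pass computes exactly A's bingo
theorem pv_fused_eq_bingo (g : List (List Int)) :
    (((PySem.List.enumerate g).foldl
       (fun (s : Bool × List Bool × Bool × Bool) (p : Int × List Int) =>
         (s.1 || p.2.all (fun c => decide (c = -1)),
          (PySem.List.enumerate s.2.1).map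
            (fun q => q.2 && decide (PySem.List.pyGetD p.2 q.1 0 = -1)),
          s.2.2.1 && decide (PySem.List.pyGetD p.2 p.1 0 = -1),
          s.2.2.2 && decide (PySem.List.pyGetD p.2 ((g.length : Int) - 1 - p.1) 0 = -1)))
       (false, List.replicate g.length true, true, true)).1
     || ((PySem.List.enumerate g).foldl
       (fun (s : Bool × List Bool × Bool × Bool) (p : Int × List Int) =>
         (s.1 || p.2.all (fun c => decide (c = -1)),
          (PySem.List.enumerate s.2.1).map
            (fun q => q.2 && decide (PySem.List.pyGetD p.2 q.1 0 = -1)),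
          s.2.2.1 && decide (PySem.List.pyGetD p.2 p.1 0 = -1),
          s.2.2.2 && decide (PySem.List.pyGetD p.2 ((g.length : Int) - 1 - p.1) 0 = -1)))
       (false, List.replicate g.length true, true, true)).2.1.any id
     || ((PySem.List.enumerate g).foldl
       (fun (s : Bool × List Bool × Bool × Bool) (p : Int × List Int) =>
         (s.1 || p.2.all (fun c => decide (c = -1)),
          (PySem.List.enumerate s.2.1).map
            (fun q => q.2 && decide (PySem.List.pyGetD p.2 q.1 0 = -1)),
          s.2.2.1 && decide (PySem.List.pyGetD p.2 p.1 0 = -1),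
          s.2.2.2 && decide (PySem.List.pyGetD p.2 ((g.length : Int) - 1 - p.1) 0 = -1)))
       (false, List.replicate g.length true, true, true)).2.2.1
     || ((PySem.List.enumerate g).foldl
       (fun (s : Bool × List Bool × Bool × Bool) (p : Int × List Int) =>
         (s.1 || p.2.all (fun c => decide (c = -1)),
          (PySem.List.enumerate s.2.1).map
            (fun q => q.2 && decide (PySem.List.pyGetD p.2 q.1 0 = -1)),
          s.2.2.1 && decide (PySem.List.pyGetD p.2 p.1 0 = -1),
          s.2.2.2 && decide (PySem.List.pyGetD p.2 ((g.length : Int) - 1 - p.1) 0 = -1)))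
       (false, List.replicate g.length true, true, true)).2.2.2)
    = pvBingo g := by
  rw [PySem.List.foldl_prod_mk
    (f := fun (b : Bool) (p : Int × List Int) => b || p.2.all (fun c => decide (c = -1)))
    (g := fun (t : List Bool × Bool × Bool) (p : Int × List Int) =>
      ((PySem.List.enumerate t.1).map
         (fun q => q.2 && decide (PySem.List.pyGetD p.2 q.1 0 = -1)),
       t.2.1 && decide (PySem.List.pyGetD p.2 p.1 0 = -1),
       t.2.2 && decide (PySem.List.pyGetD p.2 ((g.length : Int) - 1 - p.1) 0 = -1)))]
  rw [PySem.List.foldl_prod_mk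
    (f := fun (col : List Bool) (p : Int × List Int) =>
      (PySem.List.enumerate col).map
        (fun q => q.2 && decide (PySem.List.pyGetD p.2 q.1 0 = -1)))
    (g := fun (t : Bool × Bool) (p : Int × List Int) =>
      (t.1 && decide (PySem.List.pyGetD p.2 p.1 0 = -1),
       t.2 && decide (PySem.List.pyGetD p.2 ((g.length : Int) - 1 - p.1) 0 = -1)))]
  rw [PySem.List.foldl_prod_mk
    (f := fun (b : Bool) (p : Int × List Int) => b && decide (PySem.List.pyGetD p.2 p.1 0 = -1))
    (g := fun (b : Bool) (p : Int × List Int) => b && decide (PySem.List.pyGetD p.2 ((g.length : Int) - 1 - p.1) 0 = -1))]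
  dsimp only
  -- rowwin component
  rw [pv_foldl_enum_snd g
    (f := fun (b : Bool) (r : List Int) => b || r.all (fun c => decide (c = -1))),
    pv_foldl_or]
  -- column component
  rw [pv_foldl_enum_snd g
    (f := fun (col : List Bool) (r : List Int) =>
      (PySem.List.enumerate col).map
        (fun q => q.2 && decide (PySem.List.pyGetD r q.1 0 = -1))),
    show (List.replicate g.length true) = (List.range g.length).map (fun _ => true) by
      simp [List.map_const'],
    pv_col_fold]
  -- diagonal components
  rw [pv_foldl_and, pv_foldl_and,
    pv_enum_all g (fun p => decide (PySem.List.pyGetD p.2 p.1 0 = -1)),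
    pv_enum_all g (fun p => decide (PySem.List.pyGetD p.2 ((g.length : Int) - 1 - p.1) 0 = -1))]
  -- assemble against A's helpers
  rw [pvBingo, pvVerificaLinha_eq, pvVerificaColuna_eq, pvVerificaDiagonal_eq]
  have hcol : (fun (j : Nat) => g.all (fun r => decide (PySem.List.pyGetD r (j : Int) 0 = -1)))
      = (fun (j : Nat) => (List.range g.length).all (fun i =>
          decide (PySem.List.pyGetD (PySem.List.pyGetD g (i : Int) []) (j : Int) 0 = -1))) := by
    funext j
    exact pv_all_rows g (fun r => decide (PySem.List.pyGetD r (j : Int) 0 = -1))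
  have hd2 : (fun (i : Nat) =>
        decide (PySem.List.pyGetD (PySem.List.pyGetD g (i : Int) []) ((g.length : Int) - 1 - (i : Int)) 0 = -1))
      = (fun (i : Nat) =>
        decide (PySem.List.pyGetD (PySem.List.pyGetD g (i : Int) []) ((g.length : Int) - (i : Int) - 1) 0 = -1)) := by
    funext i
    have : ((g.length : Int) - 1 - (i : Int)) = ((g.length : Int) - (i : Int) - 1) := by ring
    rw [this]
  simp only [List.any_map, Function.comp_def, id, Bool.true_and, Bool.false_or, hcol, hd2,
    Bool.or_assoc]

-- ===== VERDICT (by name: the statement is the Claim_ definition above) =====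
theorem consulta_spec : Claim_equal_consulta := by
  intro grid tipo num _ _
  unfold Spec_consulta consulta consulta_alt
  dsimp only
  by_cases h : num ∈ PySem.List.pyGetD grid tipo []
  · obtain ⟨k, hkeq⟩ : ∃ k, PySem.List.index? (PySem.List.pyGetD grid tipo []) num = some k :=
      Option.isSome_iff_exists.mp ((PySem.List.index?_isSome_iff _ num).mpr h)
    rw [if_pos h, hkeq, pvMark_eq_set _ _ h, hkeq]
    dsimp only [Option.getD_some]
    rw [pv_fused_eq_bingo]
    by_cases hb : pvBingo (PySem.List.pySetD grid tipo
        ((PySem.List.pyGetD grid tipo []).set k (-1))) <;> simp [hb]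
  · rw [if_neg h, (PySem.List.index?_eq_none_iff _ _).mpr h]
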